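-- pv_equiv track=rewrite | github.com/JustinLee32/2020_chun_qiu_zhao | Akuna/2.py | melon_count
-- ===== SOURCE A (Python) =====
-- def  melon_count(boxes, melons):
-- 	temp=0;i=0;j=0;k=0
-- 	for l in range(len(melons)):
-- 		i=0;
-- 		while i<=len(boxes):
-- 			temp1=0;j=i;k=l
-- 			while k<len(melons) and j<len(boxes):
-- 				if melons[k]<=boxes[j]:
-- 					j+=1;k+=1;temp1+=1
-- 				else:
-- 					j+=1
-- 			temp=max(temp,temp1);i+=1
-- 	return temp
-- ===== SOURCE B (Python) =====
-- def melon_count(boxes, melons):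
--     best = 0
--     for l in range(len(melons)):
--         k = l
--         for b in boxes:
--             if k < len(melons) and melons[k] <= b:
--                 k += 1
--         best = max(best, k - l)
--     return best
-- ===== Notes on version B (the rewrite author's own statement) =====
-- stated objective: faster
-- what changed: B drops A's loop over box start positions entirely (starting the greedy match at box 0 is provably optimal, proved via pvG_cons_box monotonicity) and computes one greedy pointer scan per melon start, counting matches as the pointer's advance.
import Mathlib
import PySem

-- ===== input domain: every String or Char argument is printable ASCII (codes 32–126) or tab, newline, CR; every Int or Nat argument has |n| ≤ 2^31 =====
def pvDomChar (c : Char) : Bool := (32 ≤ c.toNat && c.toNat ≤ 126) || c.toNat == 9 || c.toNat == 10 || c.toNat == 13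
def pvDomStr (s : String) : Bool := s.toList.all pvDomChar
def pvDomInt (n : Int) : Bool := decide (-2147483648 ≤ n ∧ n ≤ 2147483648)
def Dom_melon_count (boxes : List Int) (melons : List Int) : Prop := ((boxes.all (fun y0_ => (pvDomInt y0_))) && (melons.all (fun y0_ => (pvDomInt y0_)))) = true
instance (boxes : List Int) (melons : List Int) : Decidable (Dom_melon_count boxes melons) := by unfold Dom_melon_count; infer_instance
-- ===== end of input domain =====

-- B drops A's redundant loop over box start positions (starting at box 0 is provably optimal),
-- turning O(m*n*(n+m)) into O(m*(n+m)): objective = faster (asymptotic).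

-- ===== PORT A =====
-- inner while loop of A: j,k walk boxes/melons, temp1 counts matches
def pvA_inner (boxes : List Int) (melons : List Int) (j k : Nat) (temp1 : Int) : Int :=
  if k < melons.length ∧ j < boxes.length then
    if melons.getD k 0 ≤ boxes.getD j 0 then
      pvA_inner boxes melons (j+1) (k+1) (temp1+1)
    else
      pvA_inner boxes melons (j+1) k temp1
  else temp1
termination_by boxes.length - j
decreasing_by all_goals omega

def melon_count (boxes : List Int) (melons : List Int) : Int :=
  (List.range melons.length).foldl (fun temp l =>
    (List.range (boxes.length + 1)).foldl (fun temp i =>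
      max temp (pvA_inner boxes melons i l 0)) temp) 0

-- ===== PORT B =====
-- B's inner for-loop over boxes: k is the pointer into melons
def pvB_greedy (melons : List Int) (l : Nat) (boxes : List Int) : Nat :=
  boxes.foldl (fun k b =>
    if k < melons.length ∧ melons.getD k 0 ≤ b then k + 1 else k) l

def melon_count_alt (boxes : List Int) (melons : List Int) : Int :=
  (List.range melons.length).foldl (fun best l =>
    max best ((pvB_greedy melons l boxes : Int) - (l : Int))) 0

-- ===== PRECONDITION & SPEC =====
def Spec_melon_count (boxes : List Int) (melons : List Int) (out : Int) : Prop := out = melon_count_alt boxes melons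
instance (boxes : List Int) (melons : List Int) (out : Int) : Decidable (Spec_melon_count boxes melons out) := by unfold Spec_melon_count; infer_instance

-- ===== CLAIM (what is proved, stated in full; the proofs are below) =====
def Claim_equal_melon_count : Prop := ∀ (boxes : List Int) (melons : List Int), Dom_melon_count boxes melons → Spec_melon_count boxes melons (melon_count boxes melons)

-- ===== LEMMAS AND PROOFS =====

-- structural greedy matcher: both ports' inner loops compute this
def pvG : List Int → List Int → Nat
  | [], _ => 0
  | _ :: _, [] => 0
  | b :: bs, m :: ms => if m ≤ b then 1 + pvG bs ms else pvG bs (m :: ms)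

theorem pvG_nil_melons (bs : List Int) : pvG bs [] = 0 := by
  cases bs <;> simp [pvG]

-- dropping the first melon loses at most one match
theorem pvG_drop_melon (bs : List Int) : ∀ m ms, pvG bs (m :: ms) ≤ 1 + pvG bs ms := by
  induction bs with
  | nil => intro m ms; simp [pvG]
  | cons b bs ih =>
    intro m ms
    cases ms with
    | nil =>
      by_cases h : m ≤ b
      · simp [pvG, h, pvG_nil_melons]
      · simp only [pvG, if_neg h, pvG_nil_melons]
        have h1 := ih m []
        have h2 : pvG bs [] = 0 := pvG_nil_melons bs
        omega
    | cons m' ms' =>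
      by_cases h : m ≤ b
      · by_cases h' : m' ≤ b
        · simp only [pvG, if_pos h, if_pos h']
          have := ih m' ms'
          omega
        · simp only [pvG, if_pos h, if_neg h']
          omega
      · by_cases h' : m' ≤ b
        · have h1 := ih m (m' :: ms')
          have h2 := ih m' ms'
          simp only [pvG, if_neg h, if_pos h'] at *
          omega
        · have h1 := ih m (m' :: ms')
          simp only [pvG, if_neg h, if_neg h'] at *
          omega

-- prepending a box does not decrease the greedy count
theorem pvG_cons_box (b : Int) (bs ms : List Int) : pvG bs ms ≤ pvG (b :: bs) ms := by
  cases ms with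
  | nil => simp [pvG_nil_melons, pvG]
  | cons m ms =>
    by_cases h : m ≤ b
    · simpa [pvG, h] using pvG_drop_melon bs m ms
    · simp [pvG, h]

theorem pvG_drop_box (boxes : List Int) : ∀ (i : Nat) (ms : List Int), pvG (boxes.drop i) ms ≤ pvG boxes ms := by
  induction boxes with
  | nil => intro i ms; simp
  | cons b bs ih =>
    intro i ms
    cases i with
    | zero => simp
    | succ i => exact le_trans (ih i ms) (pvG_cons_box b bs ms)

-- A's inner while loop computes pvG on the suffixes
theorem pvA_inner_eq (boxes melons : List Int) : ∀ j k (t : Int),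
    pvA_inner boxes melons j k t = t + (pvG (boxes.drop j) (melons.drop k) : Int) := by
  intro j k t
  fun_induction pvA_inner boxes melons j k t with
  | case1 j k t h hle ih =>
    obtain ⟨hk, hj⟩ := h
    have hdm : melons.drop k = melons.getD k 0 :: melons.drop (k+1) := by
      rw [List.drop_eq_getElem_cons hk, List.getD_eq_getElem _ _ hk]
    have hdb : boxes.drop j = boxes.getD j 0 :: boxes.drop (j+1) := by
      rw [List.drop_eq_getElem_cons hj, List.getD_eq_getElem _ _ hj]
    rw [ih, hdm, hdb, pvG, if_pos hle]
    push_cast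
    ring
  | case2 j k t h hle ih =>
    obtain ⟨hk, hj⟩ := h
    have hdm : melons.drop k = melons.getD k 0 :: melons.drop (k+1) := by
      rw [List.drop_eq_getElem_cons hk, List.getD_eq_getElem _ _ hk]
    have hdb : boxes.drop j = boxes.getD j 0 :: boxes.drop (j+1) := by
      rw [List.drop_eq_getElem_cons hj, List.getD_eq_getElem _ _ hj]
    rw [ih, hdb]
    conv_rhs => rw [hdm]
    rw [pvG, if_neg hle, ← hdm]
  | case3 j k t h =>
    have : pvG (boxes.drop j) (melons.drop k) = 0 := by
      rcases not_and_or.mp h with hk | hj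
      · have : melons.drop k = [] := List.drop_eq_nil_of_le (by omega)
        rw [this, pvG_nil_melons]
      · have : boxes.drop j = [] := List.drop_eq_nil_of_le (by omega)
        rw [this]; rfl
    rw [this]
    omega

-- B's fold computes l + pvG
theorem pvB_foldl_eq (melons : List Int) (boxes : List Int) : ∀ k : Nat,
    boxes.foldl (fun k b => if k < melons.length ∧ melons.getD k 0 ≤ b then k + 1 else k) k
      = k + pvG boxes (melons.drop k) := by
  induction boxes with
  | nil => intro k; simp [pvG]
  | cons b bs ih =>
    intro k
    by_cases hk : k < melons.length
    · have hd : melons.drop k = melons.getD k 0 :: melons.drop (k+1) := by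
        rw [List.drop_eq_getElem_cons hk, List.getD_eq_getElem _ _ hk]
      by_cases hle : melons.getD k 0 ≤ b
      · simp only [List.foldl_cons, if_pos (And.intro hk hle), ih, hd, pvG, if_pos hle]
        omega
      · have hcond : ¬(k < melons.length ∧ melons.getD k 0 ≤ b) := by tauto
        simp only [List.foldl_cons, if_neg hcond, ih]
        conv_rhs => rw [hd]
        rw [pvG, if_neg hle, ← hd]
    · have hd : melons.drop k = [] := List.drop_eq_nil_of_le (by omega)
      have hcond : ¬(k < melons.length ∧ melons.getD k 0 ≤ b) := by tauto
      simp only [List.foldl_cons, if_neg hcond, ih, hd, pvG_nil_melons]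

-- max-fold collapses when every element is bounded by the accumulator
theorem foldl_max_le (f : Nat → Int) : ∀ (ls : List Nat) (t : Int), (∀ i ∈ ls, f i ≤ t) →
    ls.foldl (fun acc i => max acc (f i)) t = t := by
  intro ls
  induction ls with
  | nil => intro t _; rfl
  | cons x xs ih =>
    intro t h
    have hx : f x ≤ t := h x (by simp)
    simp only [List.foldl_cons, max_eq_left hx]
    exact ih t (fun i hi => h i (by simp [hi]))

theorem melon_count_spec' : ∀ boxes melons, melon_count boxes melons = melon_count_alt boxes melons := by
  intro boxes melons
  unfold melon_count melon_count_alt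
  have hfun : (fun (temp : Int) (l : Nat) =>
      (List.range (boxes.length + 1)).foldl (fun temp i =>
        max temp (pvA_inner boxes melons i l 0)) temp)
      = (fun (best : Int) (l : Nat) =>
        max best ((pvB_greedy melons l boxes : Int) - (l : Int))) := by
    funext temp l
    have hA : ∀ i, pvA_inner boxes melons i l 0 = (pvG (boxes.drop i) (melons.drop l) : Int) := by
      intro i
      rw [pvA_inner_eq]
      ring
    have hB : (pvB_greedy melons l boxes : Int) - (l : Int) = (pvG boxes (melons.drop l) : Int) := by
      unfold pvB_greedy
      rw [pvB_foldl_eq]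
      push_cast
      ring
    rw [hB, List.range_succ_eq_map, List.foldl_cons, hA]
    have h0 : boxes.drop 0 = boxes := List.drop_zero
    rw [h0]
    apply foldl_max_le
    intro i hi
    rw [hA]
    have := pvG_drop_box boxes i (melons.drop l)
    have hle : (pvG (boxes.drop i) (melons.drop l) : Int) ≤ (pvG boxes (melons.drop l) : Int) := by
      exact_mod_cast this
    exact le_trans hle (le_max_right _ _)
  rw [hfun]

-- ===== VERDICT (by name: the statement is the Claim_ definition above) =====
theorem melon_count_spec : Claim_equal_melon_count := by
  intro boxes melons _
  unfold Spec_melon_count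
  exact melon_count_spec' boxes melons
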